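-- pv_equiv track=rewrite | github.com/rjorton/SeqFeats | seqfeats_host_cpb.py | count_bridge_dinucleotides
-- ===== SOURCE A (Python) =====
-- def count_bridge_dinucleotides(this_seq, dinuc_dict):
--     for i in range(2, len(this_seq)-1, 3):
--         this_dinuc = this_seq[i:i+2]
--
--         if this_dinuc in dinuc_dict:
--             dinuc_dict[this_dinuc] += 1
--         else:
--             dinuc_dict["NN"] += 1
--
--     return dinuc_dict
-- ===== SOURCE B (Python) =====
-- def count_bridge_dinucleotides(this_seq, dinuc_dict):
--     # Per-key aggregation instead of per-occurrence increments: collect the bridge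
--     # dinucleotides, then update every dict key once — with its occurrence count,
--     # plus (for "NN") the total number of bridges matching no key.
--     bridges = [this_seq[i:i + 2] for i in range(2, len(this_seq) - 1, 3)]
--     extra = sum(1 for b in bridges if b not in dinuc_dict)
--     for k in dinuc_dict:
--         dinuc_dict[k] += bridges.count(k) + (extra if k == "NN" else 0)
--     return dinuc_dict
-- ===== Notes on version B (the rewrite author's own statement) =====
-- stated objective: alternative
-- what changed: B inverts the loop: instead of A's per-occurrence conditional increment over sequence positions, B extracts the bridge list once, tallies the unmatched bridges, and then updates each dict key exactly once with bridges.count(key) plus (for 'NN') the unmatched total.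
import Mathlib
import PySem

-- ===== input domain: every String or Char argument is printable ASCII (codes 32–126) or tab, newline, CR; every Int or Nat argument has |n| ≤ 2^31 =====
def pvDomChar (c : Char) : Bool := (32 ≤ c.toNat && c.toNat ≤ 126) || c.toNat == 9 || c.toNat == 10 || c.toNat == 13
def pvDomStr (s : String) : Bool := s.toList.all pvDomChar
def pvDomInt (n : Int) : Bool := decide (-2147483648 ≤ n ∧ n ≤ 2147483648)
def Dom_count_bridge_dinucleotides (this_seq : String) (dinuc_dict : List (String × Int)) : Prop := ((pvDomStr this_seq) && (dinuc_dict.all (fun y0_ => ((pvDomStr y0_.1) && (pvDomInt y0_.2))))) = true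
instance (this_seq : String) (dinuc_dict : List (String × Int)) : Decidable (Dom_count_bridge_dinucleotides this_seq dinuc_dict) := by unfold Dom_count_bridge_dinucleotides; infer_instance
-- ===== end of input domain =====

-- B replaces A's per-occurrence conditional-increment loop by per-key aggregation
-- (count each key's bridges once, plus an unmatched-tally for "NN"); objective: alternative,
-- same mutation-in-place in Python — equivalence here is about the returned value.


-- ===== PORT A =====
-- A-side helper: Python's `d[k] += 1` on the association-list dict — add at the first
-- occurrence of key k; exact wherever k is a key (Python raises KeyError otherwise: excluded by Pre_)
def pvBump (d : List (String × Int)) (k : String) : List (String × Int) :=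
  match d with
  | [] => []
  | (k', v) :: rest => if k' = k then (k', v + 1) :: rest else (k', v) :: pvBump rest k

def count_bridge_dinucleotides (this_seq : String) (dinuc_dict : List (String × Int)) : List (String × Int) :=
  (PySem.List.pyRange 2 (PySem.Str.len this_seq - 1) 3).foldl
    (fun d i =>
      let this_dinuc := PySem.Str.slice this_seq (some i) (some (i + 2))
      if this_dinuc ∈ d.map Prod.fst then pvBump d this_dinuc
      else pvBump d "NN")
    dinuc_dict

-- ===== PORT B =====
-- B-side helper: `for k in dinuc_dict: dinuc_dict[k] += …` — Python iterates each dict key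
-- once, so the `seen` set makes the association-list walk touch each distinct key once.
def pvMergeCounts (bridges : List String) (extra : Int) (seen : List String) :
    List (String × Int) → List (String × Int)
  | [] => []
  | (k, v) :: rest =>
    if k ∈ seen then (k, v) :: pvMergeCounts bridges extra seen rest
    else (k, v + (bridges.count k : Int) + (if k = "NN" then extra else 0)) ::
          pvMergeCounts bridges extra (k :: seen) rest

def count_bridge_dinucleotides_alt (this_seq : String) (dinuc_dict : List (String × Int)) : List (String × Int) :=
  let bridges := (PySem.List.pyRange 2 (PySem.Str.len this_seq - 1) 3).map
    (fun i => PySem.Str.slice this_seq (some i) (some (i + 2)))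
  let keys := dinuc_dict.map Prod.fst
  let extra : Int := ((bridges.filter (fun b => b ∉ keys)).length : Int)
  pvMergeCounts bridges extra [] dinuc_dict

-- ===== PRECONDITION & SPEC =====
-- Pre_ excludes exactly the inputs on which Python A raises KeyError: some bridge dinucleotide
-- is not a key of dinuc_dict while "NN" is not a key either.
def Pre_count_bridge_dinucleotides (this_seq : String) (dinuc_dict : List (String × Int)) : Prop :=
  "NN" ∈ dinuc_dict.map Prod.fst ∨
    ∀ i ∈ PySem.List.pyRange 2 (PySem.Str.len this_seq - 1) 3,
      PySem.Str.slice this_seq (some i) (some (i + 2)) ∈ dinuc_dict.map Prod.fst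
instance (this_seq : String) (dinuc_dict : List (String × Int)) : Decidable (Pre_count_bridge_dinucleotides this_seq dinuc_dict) := by unfold Pre_count_bridge_dinucleotides; infer_instance
def pvWitness_count_bridge_dinucleotides : String × (List (String × Int)) := ("ACGTACG", [("GT", 2), ("NN", 0)])

def Spec_count_bridge_dinucleotides (this_seq : String) (dinuc_dict : List (String × Int)) (out : List (String × Int)) : Prop := out = count_bridge_dinucleotides_alt this_seq dinuc_dict
instance (this_seq : String) (dinuc_dict : List (String × Int)) (out : List (String × Int)) : Decidable (Spec_count_bridge_dinucleotides this_seq dinuc_dict out) := by unfold Spec_count_bridge_dinucleotides; infer_instance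

-- ===== CLAIM (what is proved, stated in full; the proofs are below) =====
def Claim_equal_count_bridge_dinucleotides : Prop := ∀ (this_seq : String) (dinuc_dict : List (String × Int)), Dom_count_bridge_dinucleotides this_seq dinuc_dict → Pre_count_bridge_dinucleotides this_seq dinuc_dict → Spec_count_bridge_dinucleotides this_seq dinuc_dict (count_bridge_dinucleotides this_seq dinuc_dict)

-- ===== LEMMAS AND PROOFS =====

-- proof-side generic form of B's merge: bump each first key occurrence by f key
def pvAddAll (f : String → Int) (seen : List String) : List (String × Int) → List (String × Int)
  | [] => []
  | (k, v) :: rest =>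
    if k ∈ seen then (k, v) :: pvAddAll f seen rest
    else (k, v + f k) :: pvAddAll f (k :: seen) rest

theorem map_fst_pvBump (d : List (String × Int)) (k : String) :
    (pvBump d k).map Prod.fst = d.map Prod.fst := by
  induction d with
  | nil => rfl
  | cons hd tl ih =>
    obtain ⟨k', v⟩ := hd
    simp only [pvBump]
    split_ifs <;> simp [ih]

-- congruence: pvAddAll only evaluates f at unseen keys of the list
theorem pvAddAll_congr (f g : String → Int) :
    ∀ (d : List (String × Int)) (seen : List String),
      (∀ k ∈ d.map Prod.fst, k ∉ seen → f k = g k) →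
      pvAddAll f seen d = pvAddAll g seen d := by
  intro d
  induction d with
  | nil => intro _ _; rfl
  | cons hd tl ih =>
    obtain ⟨k, v⟩ := hd
    intro seen h
    simp only [pvAddAll]
    split_ifs with hk
    · exact congrArg _ (ih seen fun k' hk' hs => h k' (by simp [hk']) hs)
    · rw [h k (by simp) hk]
      refine congrArg _ (ih (k :: seen) fun k' hk' hs => ?_)
      exact h k' (by simp [hk']) (fun hmem => hs (List.mem_cons_of_mem _ hmem))

theorem pvAddAll_zero (f : String → Int) :
    ∀ (d : List (String × Int)) (seen : List String),
      (∀ k ∈ d.map Prod.fst, k ∉ seen → f k = 0) →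
      pvAddAll f seen d = d := by
  intro d
  induction d with
  | nil => intro _ _; rfl
  | cons hd tl ih =>
    obtain ⟨k, v⟩ := hd
    intro seen h
    simp only [pvAddAll]
    split_ifs with hk
    · exact congrArg _ (ih seen fun k' hk' hs => h k' (by simp [hk']) hs)
    · rw [h k (by simp) hk, add_zero]
      refine congrArg _ (ih (k :: seen) fun k' hk' hs => ?_)
      exact h k' (by simp [hk']) (fun hmem => hs (List.mem_cons_of_mem _ hmem))

-- pushing one pvBump under pvAddAll
theorem pvAddAll_pvBump (f : String → Int) (c : String) :
    ∀ (d : List (String × Int)) (seen : List String), c ∉ seen →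
      pvAddAll f seen (pvBump d c)
        = pvAddAll (fun k => f k + if k = c then 1 else 0) seen d := by
  intro d
  induction d with
  | nil => intro _ _; rfl
  | cons hd tl ih =>
    obtain ⟨k, v⟩ := hd
    intro seen hc
    by_cases hkc : k = c
    · subst hkc
      simp only [pvBump, pvAddAll, if_true, if_neg hc]
      refine congrArg₂ _ (by rw [Prod.mk.injEq]; exact ⟨rfl, by omega⟩) ?_
      exact (pvAddAll_congr _ _ tl (k :: seen) fun k' _ hs => by
        rcases eq_or_ne k' k with h | h
        · exact absurd (h ▸ List.mem_cons_self ..) hs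
        · simp [h]).symm
    · simp only [pvBump, if_neg hkc, pvAddAll]
      split_ifs with hk
      · exact congrArg _ (ih seen hc)
      · simp only [add_zero]
        exact congrArg _ (ih (k :: seen) (by simp [Ne.symm hkc, hc]))

-- bumping once per occurrence (through the key map g) equals bumping each first
-- key occurrence by its count of g-images
theorem foldl_pvBump_eq_pvAddAll (g : String → String) (cs : List String) :
    ∀ (d : List (String × Int)),
      cs.foldl (fun d b => pvBump d (g b)) d
        = pvAddAll (fun k => ((cs.map g).count k : Int)) [] d := by
  induction cs with
  | nil =>
    intro d
    simpa using (pvAddAll_zero _ d [] (fun k _ _ => by simp)).symm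
  | cons c cs ih =>
    intro d
    rw [List.foldl_cons, ih (pvBump d (g c)),
      pvAddAll_pvBump (fun k => ((cs.map g).count k : Int)) (g c) d [] (by simp)]
    refine pvAddAll_congr _ _ d [] fun k _ _ => ?_
    rcases eq_or_ne k (g c) with h | h
    · subst h; simp
    · simp [h, Ne.symm h]

-- replace A's live membership test by the test on the initial (fold-invariant) keys
theorem foldA_fixed_keys (K : List String) (bs : List String) :
    ∀ (d : List (String × Int)), d.map Prod.fst = K →
      bs.foldl (fun d b => if b ∈ d.map Prod.fst then pvBump d b else pvBump d "NN") d
        = bs.foldl (fun d b => pvBump d (if b ∈ K then b else "NN")) d := by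
  induction bs with
  | nil => intro d _; rfl
  | cons b bs ih =>
    intro d hd
    simp only [List.foldl_cons, hd]
    split_ifs with h
    · exact ih _ (by rw [map_fst_pvBump, hd])
    · exact ih _ (by rw [map_fst_pvBump, hd])

-- pointwise: for a key k of the dict, counting images under the "match-or-NN" map
-- equals counting k itself plus (for "NN") the unmatched-bridge tally
theorem count_map_matchNN_nat (K : List String) (k : String) (hk : k ∈ K) (bs : List String) :
    ((bs.map (fun b => if b ∈ K then b else "NN")).count k)
      = bs.count k + (if k = "NN" then (bs.filter (fun b => b ∉ K)).length else 0) := by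
  induction bs with
  | nil => simp
  | cons b bs ih =>
    simp only [List.map_cons, List.count_cons, List.filter_cons, ih]
    by_cases hbK : b ∈ K
    · have hfilt : (decide (b ∉ K)) = false := by simp [hbK]
      simp only [if_pos hbK, hfilt, Bool.false_eq_true, if_false]
      split_ifs <;> omega
    · have hbk : (b == k) = false := by
        simp only [beq_eq_false_iff_ne]; exact fun h => hbK (h ▸ hk)
      have hfilt : (decide (b ∉ K)) = true := by simp [hbK]
      simp only [if_neg hbK, hfilt, if_true, hbk, Bool.false_eq_true, if_false, add_zero,
        List.length_cons]
      by_cases hNN : k = "NN"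
      · simp [hNN]
        omega
      · have : ("NN" == k) = false := by simp [Ne.symm hNN]
        simp [this, hNN]

-- B's merge is pvAddAll with the per-key totals
theorem pvMergeCounts_eq_pvAddAll (bridges : List String) (extra : Int) :
    ∀ (d : List (String × Int)) (seen : List String),
      pvMergeCounts bridges extra seen d
        = pvAddAll (fun k => (bridges.count k : Int) + (if k = "NN" then extra else 0)) seen d := by
  intro d
  induction d with
  | nil => intro _; rfl
  | cons hd tl ih =>
    obtain ⟨k, v⟩ := hd
    intro seen
    simp only [pvMergeCounts, pvAddAll, add_assoc]
    split_ifs with hk <;> exact congrArg _ (ih _)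

-- ===== VERDICT (by name: the statement is the Claim_ definition above) =====
theorem count_bridge_dinucleotides_spec : Claim_equal_count_bridge_dinucleotides := by
  intro s dd _ _
  unfold Spec_count_bridge_dinucleotides count_bridge_dinucleotides count_bridge_dinucleotides_alt
  set bridges := (PySem.List.pyRange 2 (PySem.Str.len s - 1) 3).map
    (fun i => PySem.Str.slice s (some i) (some (i + 2))) with hbr
  set K := dd.map Prod.fst with hK
  show (PySem.List.pyRange 2 (PySem.Str.len s - 1) 3).foldl
      (fun d i =>
        let this_dinuc := PySem.Str.slice s (some i) (some (i + 2))
        if this_dinuc ∈ d.map Prod.fst then pvBump d this_dinuc else pvBump d "NN") dd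
      = pvMergeCounts bridges (((bridges.filter (fun b => b ∉ K)).length : Int)) [] dd
  have hA : (PySem.List.pyRange 2 (PySem.Str.len s - 1) 3).foldl
      (fun d i =>
        let this_dinuc := PySem.Str.slice s (some i) (some (i + 2))
        if this_dinuc ∈ d.map Prod.fst then pvBump d this_dinuc else pvBump d "NN") dd
      = bridges.foldl (fun d b => if b ∈ d.map Prod.fst then pvBump d b else pvBump d "NN") dd := by
    rw [hbr, List.foldl_map]
  rw [hA, foldA_fixed_keys K bridges dd rfl,
    foldl_pvBump_eq_pvAddAll (fun b => if b ∈ K then b else "NN") bridges dd,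
    pvMergeCounts_eq_pvAddAll]
  refine pvAddAll_congr _ _ dd [] fun k hk _ => ?_
  rw [count_map_matchNN_nat K k hk bridges]
  push_cast
  split_ifs <;> ring
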